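-- pv_equiv track=rewrite | github.com/cisnlp/manchu-in-context-mt | pipeline/get_components.py | transform_word
-- ===== SOURCE A (Python) =====
-- def next_consonant(char):
--     consonants = "bcdfghjklmnpqrstvwxyz"
--     if char in consonants:
--         index = consonants.index(char)
--         return consonants[(index + 1) % len(consonants)]
--     return char
--
-- def next_vowel(char):
--     vowels = "aeiou"
--     if char in vowels:
--         index = vowels.index(char)
--         return vowels[(index + 1) % len(vowels)]
--     return char
--
-- def transform_word(word):
--     result = []
--     for char in word.lower():
--         if char in "bcdfghjklmnpqrstvwxyz":
--             result.append(next_consonant(char))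
--         elif char in "aeiou":
--             result.append(next_vowel(char))
--         else:
--             result.append(char)
--     return ''.join(result)
-- ===== SOURCE B (Python) =====
-- def transform_word(word):
--     # Different algorithm: instead of indexing into the consonant/vowel strings,
--     # walk the alphabet cyclically (char-code arithmetic) until the next letter
--     # of the same class (vowel vs consonant) is found.  Correct because the
--     # consonants and the vowels each appear in alphabetical order, so the next
--     # same-class letter in alphabet order IS the cyclic successor in its class.
--     out = []
--     for c in word.lower():
--         if 'a' <= c <= 'z':
--             v = c in "aeiou"
--             n = c
--             while True:
--                 n = chr((ord(n) - 97 + 1) % 26 + 97)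
--                 if (n in "aeiou") == v:
--                     break
--             out.append(n)
--         else:
--             out.append(c)
--     return ''.join(out)
-- ===== Notes on version B (the rewrite author's own statement) =====
-- stated objective: alternative
-- what changed: Instead of locating the character in a class string and indexing its rotated position (index+1 mod len), B walks the 26-letter alphabet cyclically by char-code arithmetic until it reaches the next letter of the same vowel/consonant class; no class-string indexing or index arithmetic remains.
import Mathlib
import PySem

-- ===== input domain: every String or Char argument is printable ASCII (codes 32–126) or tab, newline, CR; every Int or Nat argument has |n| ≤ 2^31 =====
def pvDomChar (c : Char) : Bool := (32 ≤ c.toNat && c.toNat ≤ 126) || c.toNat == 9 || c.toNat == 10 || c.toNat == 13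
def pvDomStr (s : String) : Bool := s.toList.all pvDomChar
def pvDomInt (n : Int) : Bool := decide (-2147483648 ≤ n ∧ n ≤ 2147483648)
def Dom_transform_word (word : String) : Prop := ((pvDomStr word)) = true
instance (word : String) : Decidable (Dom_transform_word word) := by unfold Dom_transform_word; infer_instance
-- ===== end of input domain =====

-- B replaces class-string indexing (index+1 mod len) by a cyclic alphabet walk
-- to the next letter of the same vowel/consonant class (alternative algorithm).

-- ===== PORT A =====
-- the string constants "bcdfghjklmnpqrstvwxyz" / "aeiou", as their character lists
def pvConsA : List Char := ['b','c','d','f','g','h','j','k','l','m','n','p','q','r','s','t','v','w','x','y','z']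

def pvVowA : List Char := ['a','e','i','o','u']

def next_consonant (char : Char) : Char :=
  if char ∈ pvConsA then
    match PySem.List.index? pvConsA char with
    | some index =>
        (PySem.List.pyGet? pvConsA
          (PySem.Int.mod ((index : Int) + 1) (PySem.List.len pvConsA))).getD char
    | none => char  -- unreachable: char ∈ pvConsA
  else char

def next_vowel (char : Char) : Char :=
  if char ∈ pvVowA then
    match PySem.List.index? pvVowA char with
    | some index =>
        (PySem.List.pyGet? pvVowA
          (PySem.Int.mod ((index : Int) + 1) (PySem.List.len pvVowA))).getD char
    | none => char  -- unreachable: char ∈ pvVowA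
  else char

def transform_word (word : String) : String :=
  let result : List Char :=
    (PySem.Chars.lower word.toList).foldl
      (fun result char =>
        if char ∈ pvConsA then result ++ [next_consonant char]
        else if char ∈ pvVowA then result ++ [next_vowel char]
        else result ++ [char]) []
  String.ofList result  -- ''.join(result)

-- ===== PORT B =====
def pvVowB : List Char := ['a','e','i','o','u']  -- "aeiou"

-- the 'while True' loop: advance n cyclically through a..z until the class
-- (vowel vs consonant) matches v; fuel 26 is a pure termination guard — Python
-- reaches a same-class letter within 26 steps (both classes are nonempty)
def pvWalkB (v : Bool) : Char → Nat → Char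
  | n, 0 => n
  | n, fuel + 1 =>
      let m := Char.ofNat ((n.toNat - 97 + 1) % 26 + 97)  -- chr((ord(n)-97+1)%26+97)
      if (decide (m ∈ pvVowB)) = v then m else pvWalkB v m fuel

def transform_word_alt (word : String) : String :=
  let out : List Char :=
    (PySem.Chars.lower word.toList).foldl
      (fun out c =>
        if 'a' ≤ c ∧ c ≤ 'z' then
          out ++ [pvWalkB (decide (c ∈ pvVowB)) c 26]
        else out ++ [c]) []
  String.ofList out  -- ''.join(out)

-- ===== PRECONDITION & SPEC =====
def Spec_transform_word (word : String) (out : String) : Prop := out = transform_word_alt word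
instance (word : String) (out : String) : Decidable (Spec_transform_word word out) := by unfold Spec_transform_word; infer_instance

-- ===== CLAIM (what is proved, stated in full; the proofs are below) =====
def Claim_equal_transform_word : Prop := ∀ (word : String), Dom_transform_word word → Spec_transform_word word (transform_word word)

-- ===== LEMMAS AND PROOFS =====

-- every letter a..z is a consonant or a vowel of A's class strings
theorem pv_letters (c : Char) (h1 : 'a' ≤ c) (h2 : c ≤ 'z') :
    c ∈ pvConsA ∨ c ∈ pvVowA := by
  have h1' : 97 ≤ c.toNat := h1
  have h2' : c.toNat ≤ 122 := h2
  have hc : Char.ofNat c.toNat = c := Char.ofNat_toNat c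
  rw [← hc]
  interval_cases c.toNat <;> decide

-- the two per-character transformations agree on every character
theorem pv_char_eq (c : Char) :
    (if c ∈ pvConsA then next_consonant c
     else if c ∈ pvVowA then next_vowel c
     else c)
      = (if 'a' ≤ c ∧ c ≤ 'z' then pvWalkB (decide (c ∈ pvVowB)) c 26 else c) := by
  by_cases hc : c ∈ pvConsA
  · simp only [pvConsA, List.mem_cons, List.not_mem_nil, or_false] at hc
    rcases hc with rfl|rfl|rfl|rfl|rfl|rfl|rfl|rfl|rfl|rfl|rfl|rfl|rfl|rfl|rfl|rfl|rfl|rfl|rfl|rfl|rfl <;> decide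
  · by_cases hv : c ∈ pvVowA
    · simp only [pvVowA, List.mem_cons, List.not_mem_nil, or_false] at hv
      rcases hv with rfl|rfl|rfl|rfl|rfl <;> decide
    · have hl : ¬ ('a' ≤ c ∧ c ≤ 'z') := by
        rintro ⟨h1, h2⟩
        rcases pv_letters c h1 h2 with h | h
        · exact hc h
        · exact hv h
      simp [hc, hv, hl]

theorem pv_fold_eq (cs : List Char) (acc : List Char) :
    cs.foldl
      (fun result char =>
        if char ∈ pvConsA then result ++ [next_consonant char]
        else if char ∈ pvVowA then result ++ [next_vowel char]
        else result ++ [char]) acc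
      = cs.foldl
          (fun out c =>
            if 'a' ≤ c ∧ c ≤ 'z' then
              out ++ [pvWalkB (decide (c ∈ pvVowB)) c 26]
            else out ++ [c]) acc := by
  induction cs generalizing acc with
  | nil => rfl
  | cons c cs ih =>
    simp only [List.foldl_cons]
    have hstep : (if c ∈ pvConsA then acc ++ [next_consonant c]
        else if c ∈ pvVowA then acc ++ [next_vowel c]
        else acc ++ [c])
        = (if 'a' ≤ c ∧ c ≤ 'z' then acc ++ [pvWalkB (decide (c ∈ pvVowB)) c 26]
           else acc ++ [c]) := by
      have hA : (if c ∈ pvConsA then acc ++ [next_consonant c]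
          else if c ∈ pvVowA then acc ++ [next_vowel c] else acc ++ [c])
          = acc ++ [if c ∈ pvConsA then next_consonant c
                    else if c ∈ pvVowA then next_vowel c else c] := by
        split_ifs <;> rfl
      have hB : (if 'a' ≤ c ∧ c ≤ 'z' then acc ++ [pvWalkB (decide (c ∈ pvVowB)) c 26]
          else acc ++ [c])
          = acc ++ [if 'a' ≤ c ∧ c ≤ 'z' then pvWalkB (decide (c ∈ pvVowB)) c 26 else c] := by
        split_ifs <;> rfl
      rw [hA, hB, pv_char_eq c]
    rw [hstep]
    exact ih _

-- ===== VERDICT (by name: the statement is the Claim_ definition above) =====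
theorem transform_word_spec : Claim_equal_transform_word := by
  intro word _
  unfold Spec_transform_word transform_word transform_word_alt
  rw [pv_fold_eq]
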